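-- pv_equiv track=rewrite | github.com/RyanDancoes/sudoku | helpers.py | get_house_options
-- ===== SOURCE A (Python) =====
-- def get_house_options(options, house_number):
--     sub_options = {}
--     row_start, row_end = (house_number // 3) * 3, (house_number // 3 + 1) * 3
--     col_start, col_end = (house_number % 3) * 3, (house_number % 3 + 1) * 3
--
--     for key, value in options.items():
--         if row_start <= key[0] < row_end and col_start <= key[1] < col_end:
--             sub_options[key] = value
--
--     return sub_options
-- ===== SOURCE B (Python) =====
-- def get_house_options(options, house_number):
--     groups = {}
--     for key, value in options.items():
--         groups.setdefault((key[0] // 3, key[1] // 3), []).append((key, value))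
--     return dict(groups.get((house_number // 3, house_number % 3), []))
-- ===== Notes on version B (the rewrite author's own statement) =====
-- stated objective: alternative
-- what changed: B buckets every cell into its 3x3 house by (row//3, col//3) in one grouping pass and then selects the bucket for (house_number//3, house_number%3), instead of A's per-key bounds test against precomputed row/column ranges.
import Mathlib
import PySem

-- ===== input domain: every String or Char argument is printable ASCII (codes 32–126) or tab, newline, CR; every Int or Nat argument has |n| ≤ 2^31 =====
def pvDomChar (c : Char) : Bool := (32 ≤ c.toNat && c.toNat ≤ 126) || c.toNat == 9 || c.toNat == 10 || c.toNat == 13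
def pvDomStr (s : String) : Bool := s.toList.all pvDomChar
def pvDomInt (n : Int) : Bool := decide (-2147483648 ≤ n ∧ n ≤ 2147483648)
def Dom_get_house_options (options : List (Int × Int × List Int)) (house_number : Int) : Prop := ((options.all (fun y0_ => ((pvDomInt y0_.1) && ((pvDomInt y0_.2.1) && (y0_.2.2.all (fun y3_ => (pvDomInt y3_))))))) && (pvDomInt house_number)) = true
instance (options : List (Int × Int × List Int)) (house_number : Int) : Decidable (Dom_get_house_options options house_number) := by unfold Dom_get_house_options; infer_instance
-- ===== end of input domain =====

-- B buckets cells into 3x3 houses by (row//3, col//3) in one grouping pass and selects the target bucket,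
-- instead of A's per-key range test; same cost, different shape (objective: alternative).


-- ===== PORT A =====
def get_house_options (options : List (Int × Int × List Int)) (house_number : Int) : List (Int × Int × List Int) :=
  let row_start := PySem.Int.floordiv house_number 3 * 3
  let row_end := (PySem.Int.floordiv house_number 3 + 1) * 3
  let col_start := PySem.Int.mod house_number 3 * 3
  let col_end := (PySem.Int.mod house_number 3 + 1) * 3
  let sub_options : PySem.Dict (Int × Int) (List Int) :=
    options.foldl (fun sub kv =>
      if row_start ≤ kv.1 ∧ kv.1 < row_end ∧ col_start ≤ kv.2.1 ∧ kv.2.1 < col_end then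
        sub.insert (kv.1, kv.2.1) kv.2.2
      else sub) PySem.Dict.empty
  sub_options.items.map (fun kv => (kv.1.1, kv.1.2, kv.2))

-- ===== PORT B =====
def get_house_options_alt (options : List (Int × Int × List Int)) (house_number : Int) : List (Int × Int × List Int) :=
  let groups : PySem.Dict (Int × Int) (List ((Int × Int) × List Int)) :=
    options.foldl (fun g kv =>
      g.modify (PySem.Int.floordiv kv.1 3, PySem.Int.floordiv kv.2.1 3) [] (· ++ [((kv.1, kv.2.1), kv.2.2)]))
      PySem.Dict.empty
  -- dict(pairs): within one bucket the keys are distinct (Pre_: options is a dict), so dict() is the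
  -- identity on the pair list; ported as the list of pairs re-shaped into triples.
  (groups.getD (PySem.Int.floordiv house_number 3, PySem.Int.mod house_number 3) []).map
    (fun kv => (kv.1.1, kv.1.2, kv.2))

-- ===== PRECONDITION & SPEC =====
-- Pre_: options stands for a Python dict keyed by (row, col), so its keys are pairwise distinct;
-- an assoc list with duplicate keys does not arise from any Python call of A.
def Pre_get_house_options (options : List (Int × Int × List Int)) (house_number : Int) : Prop :=
  (options.map (fun kv => (kv.1, kv.2.1))).Nodup
instance (options : List (Int × Int × List Int)) (house_number : Int) : Decidable (Pre_get_house_options options house_number) := by unfold Pre_get_house_options; infer_instance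
def pvWitness_get_house_options : (List (Int × Int × List Int)) × Int := ([(0, 1, [2, 3]), (4, 4, [5]), (1, 2, [9])], 0)

def Spec_get_house_options (options : List (Int × Int × List Int)) (house_number : Int) (out : List (Int × Int × List Int)) : Prop := out = get_house_options_alt options house_number
instance (options : List (Int × Int × List Int)) (house_number : Int) (out : List (Int × Int × List Int)) : Decidable (Spec_get_house_options options house_number out) := by unfold Spec_get_house_options; infer_instance

-- ===== CLAIM (what is proved, stated in full; the proofs are below) =====
def Claim_equal_get_house_options : Prop := ∀ (options : List (Int × Int × List Int)) (house_number : Int), Dom_get_house_options options house_number → Pre_get_house_options options house_number → Spec_get_house_options options house_number (get_house_options options house_number)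

-- ===== LEMMAS AND PROOFS =====

-- A's loop: folding conditional inserts of fresh keys over a dict appends exactly the filtered items.
lemma foldl_insert_items (p : Int × Int × List Int → Prop) [DecidablePred p]
    (l : List (Int × Int × List Int)) (s : PySem.Dict (Int × Int) (List Int))
    (hnd : (l.map (fun kv => (kv.1, kv.2.1))).Nodup)
    (hfresh : ∀ kv ∈ l, s.contains (kv.1, kv.2.1) = false) :
    (l.foldl (fun sub kv => if p kv then sub.insert (kv.1, kv.2.1) kv.2.2 else sub) s).items
      = s.items ++ (l.filter (fun kv => decide (p kv))).map (fun kv => ((kv.1, kv.2.1), kv.2.2)) := by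
  induction l generalizing s with
  | nil => simp
  | cons t l ih =>
    simp only [List.map_cons, List.nodup_cons, List.mem_map] at hnd
    simp only [List.foldl_cons, List.filter_cons]
    by_cases hp : p t
    · rw [if_pos hp]
      rw [ih (s.insert (t.1, t.2.1) t.2.2) hnd.2 ?_]
      · rw [PySem.Dict.items_insert_of_not_contains _ _ (hfresh t (by simp))]
        simp [hp, List.append_assoc]
      · intro kv hkv
        rw [PySem.Dict.contains_insert]
        have hne : (kv.1, kv.2.1) ≠ (t.1, t.2.1) := by
          intro h; exact hnd.1 ⟨kv, hkv, h⟩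
        simp [hne, hfresh kv (List.mem_cons_of_mem _ hkv)]
    · rw [if_neg hp]
      rw [ih s hnd.2 (fun kv hkv => hfresh kv (List.mem_cons_of_mem _ hkv))]
      simp [hp]

-- The range test of A and the bucket key of B agree on every cell.
lemma cond_eq_key (hn r c : Int) :
    decide (PySem.Int.floordiv hn 3 * 3 ≤ r ∧ r < (PySem.Int.floordiv hn 3 + 1) * 3 ∧
            PySem.Int.mod hn 3 * 3 ≤ c ∧ c < (PySem.Int.mod hn 3 + 1) * 3)
      = ((PySem.Int.floordiv r 3, PySem.Int.floordiv c 3)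
          == (PySem.Int.floordiv hn 3, PySem.Int.mod hn 3)) := by
  have h1 := PySem.Int.floordiv_eq_iff_of_pos (a := r) (b := 3) (q := PySem.Int.floordiv hn 3) (by norm_num)
  have h2 := PySem.Int.floordiv_eq_iff_of_pos (a := c) (b := 3) (q := PySem.Int.mod hn 3) (by norm_num)
  rw [Bool.eq_iff_iff]
  simp only [beq_iff_eq, Prod.mk.injEq, decide_eq_true_eq, h1, h2]
  tauto

-- ===== VERDICT (by name: the statement is the Claim_ definition above) =====
theorem get_house_options_spec : Claim_equal_get_house_options := by
  intro options hn _ hpre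
  unfold Spec_get_house_options get_house_options get_house_options_alt
  simp only []
  rw [foldl_insert_items _ options PySem.Dict.empty hpre (by simp [PySem.Dict.contains_empty])]
  have hB : (options.foldl (fun g kv =>
        g.modify (PySem.Int.floordiv kv.1 3, PySem.Int.floordiv kv.2.1 3) [] (· ++ [((kv.1, kv.2.1), kv.2.2)]))
        (PySem.Dict.empty)).getD (PySem.Int.floordiv hn 3, PySem.Int.mod hn 3) []
      = (options.filter (fun kv =>
          ((PySem.Int.floordiv kv.1 3, PySem.Int.floordiv kv.2.1 3)
            == (PySem.Int.floordiv hn 3, PySem.Int.mod hn 3)))).map (fun kv => ((kv.1, kv.2.1), kv.2.2)) := by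
    have h := PySem.Dict.getD_foldl_modify_append
      (l := options.map (fun kv : Int × Int × List Int =>
        ((PySem.Int.floordiv kv.1 3, PySem.Int.floordiv kv.2.1 3), ((kv.1, kv.2.1), kv.2.2))))
      (PySem.Dict.empty) (PySem.Int.floordiv hn 3, PySem.Int.mod hn 3)
    rw [List.foldl_map] at h
    simpa [List.filter_map, Function.comp_def, PySem.Dict.getD_empty] using h
  rw [hB]
  rw [List.filter_congr (fun kv _ => cond_eq_key hn kv.1 kv.2.1)]
  simp [show (PySem.Dict.empty : PySem.Dict (Int × Int) (List Int)).items = [] from rfl]
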